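-- pv_equiv track=rewrite | github.com/anrichtait/notes | cs/code/python/coin_flip_streaks.py | check_streaks
-- ===== SOURCE A (Python) =====
-- def check_streaks(history):
--     lastFlip = 0
--     currentStreak = 0
--     totalStreaks = 0
--
--     for currentFlip in history:
--         if lastFlip == currentFlip:
--             currentStreak += 1
--             if currentStreak == 6:
--                 totalStreaks += 1
--         elif lastFlip != currentFlip:
--             currentStreak = 1
--         lastFlip = currentFlip
--     return totalStreaks
-- ===== SOURCE B (Python) =====
-- def check_streaks(history):
--     n = len(history)
--     total = 0
--     i = 0
--     while i < n:
--         j = i + 1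
--         while j < n and history[j] == history[i]:
--             j += 1
--         if j - i >= 6:
--             total += 1
--         i = j
--     return total
-- ===== Notes on version B (the rewrite author's own statement) =====
-- stated objective: alternative
-- what changed: Replaces the per-element streak state machine (lastFlip/currentStreak counters with a ==6 trigger) by a run-decomposition scan: find each maximal run of equal flips in one inner scan and count the runs of length >= 6.
import Mathlib
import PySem

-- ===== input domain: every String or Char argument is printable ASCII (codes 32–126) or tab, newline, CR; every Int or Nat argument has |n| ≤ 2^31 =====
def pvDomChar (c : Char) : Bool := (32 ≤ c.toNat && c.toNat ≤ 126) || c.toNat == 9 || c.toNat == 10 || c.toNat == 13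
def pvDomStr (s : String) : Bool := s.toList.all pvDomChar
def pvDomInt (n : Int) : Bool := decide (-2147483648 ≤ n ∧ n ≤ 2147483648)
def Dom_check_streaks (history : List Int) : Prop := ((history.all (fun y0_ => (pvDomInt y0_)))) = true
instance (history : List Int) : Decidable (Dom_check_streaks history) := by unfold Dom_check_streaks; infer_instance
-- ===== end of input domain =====

-- B replaces A's per-element streak state machine by a run-decomposition scan of the same cost; return values proved equal on all inputs.

-- ===== PORT A =====
-- one iteration of A's for-loop; state = (lastFlip, currentStreak, totalStreaks)
def pvStepA (s : Int × Int × Int) (c : Int) : Int × Int × Int :=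
  let last := s.1
  let cur := s.2.1
  let tot := s.2.2
  if last == c then
    let cur' := cur + 1
    let tot' := if cur' == 6 then tot + 1 else tot
    (c, cur', tot')
  else if last != c then
    (c, 1, tot)
  else
    (c, cur, tot)

def check_streaks (history : List Int) : Int :=
  (history.foldl pvStepA (0, 0, 0)).2.2

-- ===== PORT B =====
-- B's inner while loop: advance j while j < n and history[j] == history[i]
-- (the j < n guard keeps the index in range, so `getD j 0` is exactly Python's history[j] here)
def pvRunEnd (history : List Int) (n i j : Nat) : Nat :=
  if j < n ∧ history.getD j 0 == history.getD i 0 then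
    pvRunEnd history n i (j + 1)
  else j
termination_by n - j
decreasing_by omega

-- cited by pvOuter's decreasing_by: the inner loop never moves j backwards
theorem pvRunEnd_ge (history : List Int) (n i j : Nat) : j ≤ pvRunEnd history n i j := by
  unfold pvRunEnd
  split
  · exact le_trans (Nat.le_succ j) (pvRunEnd_ge history n i (j + 1))
  · exact le_refl j
termination_by n - j
decreasing_by omega

-- B's outer while loop over run starts
def pvOuter (history : List Int) (n i : Nat) (total : Int) : Int :=
  if i < n then
    let j := pvRunEnd history n i (i + 1)
    pvOuter history n j (total + (if 6 ≤ (j : Int) - (i : Int) then 1 else 0))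
  else total
termination_by n - i
decreasing_by
  have := pvRunEnd_ge history n i (i + 1)
  omega

def check_streaks_alt (history : List Int) : Int :=
  pvOuter history history.length 0 0

-- ===== PRECONDITION & SPEC =====
def Spec_check_streaks (history : List Int) (out : Int) : Prop := out = check_streaks_alt history
instance (history : List Int) (out : Int) : Decidable (Spec_check_streaks history out) := by unfold Spec_check_streaks; infer_instance

-- ===== CLAIM (what is proved, stated in full; the proofs are below) =====
def Claim_equal_check_streaks : Prop := ∀ (history : List Int), Dom_check_streaks history → Spec_check_streaks history (check_streaks history)

-- ===== LEMMAS AND PROOFS =====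

-- reference function both ports are reduced to: one per maximal run of length ≥ 6
def pvRuns : List Int → Int
  | [] => 0
  | x :: xs =>
    (if 6 ≤ 1 + ((xs.takeWhile (· == x)).length : Int) then 1 else 0)
      + pvRuns (xs.dropWhile (· == x))
termination_by l => l.length
decreasing_by
  simp only [List.length_cons]
  exact Nat.lt_succ_of_le (List.length_dropWhile_le _ _)

theorem pv_drop_takeWhile_length (l : List Int) (p : Int → Bool) :
    l.drop (l.takeWhile p).length = l.dropWhile p := by
  induction l with
  | nil => simp
  | cons x xs ih =>
    by_cases h : p x
    · simp [h, ih]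
    · simp [List.takeWhile_cons, List.dropWhile_cons, h]

theorem pvRunEnd_eq (history : List Int) (i j : Nat) :
    pvRunEnd history history.length i j
      = j + ((history.drop j).takeWhile (· == history.getD i 0)).length := by
  unfold pvRunEnd
  by_cases hj : j < history.length
  · have hdrop : history.drop j = history[j] :: history.drop (j + 1) :=
      List.drop_eq_getElem_cons hj
    have hg : history.getD j 0 = history[j] := List.getD_eq_getElem history 0 hj
    by_cases hv : history[j] == history.getD i 0
    · rw [if_pos ⟨hj, by rw [hg]; exact hv⟩, pvRunEnd_eq history i (j + 1), hdrop]
      simp only [List.takeWhile_cons, hv, if_true, List.length_cons]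
      omega
    · rw [if_neg, hdrop, List.takeWhile_cons_of_neg (by simpa using hv)]
      · simp
      · rintro ⟨-, hc⟩
        rw [hg] at hc
        exact hv hc
  · rw [if_neg (by omega), List.drop_eq_nil_of_le (by omega)]
    simp
termination_by history.length - j
decreasing_by omega

theorem pvOuter_eq (history : List Int) (i : Nat) (total : Int) :
    pvOuter history history.length i total = total + pvRuns (history.drop i) := by
  by_cases hi : i < history.length
  · have hdrop : history.drop i = history[i] :: history.drop (i + 1) :=
      List.drop_eq_getElem_cons hi
    have hg : history.getD i 0 = history[i] := List.getD_eq_getElem history 0 hi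
    have hre : pvRunEnd history history.length i (i + 1)
        = i + 1 + ((history.drop (i + 1)).takeWhile (· == history[i])).length := by
      rw [pvRunEnd_eq, hg]
    have hdj : history.drop (i + 1 + ((history.drop (i + 1)).takeWhile (· == history[i])).length)
        = (history.drop (i + 1)).dropWhile (· == history[i]) := by
      rw [← pv_drop_takeWhile_length (history.drop (i + 1)) (· == history[i]), List.drop_drop]
    rw [pvOuter, if_pos hi, pvOuter_eq history (pvRunEnd history history.length i (i + 1)) _,
      hre, hdj, hdrop, pvRuns]
    split_ifs <;> first | ring1 | (exfalso; omega)
  · rw [pvOuter, if_neg hi, List.drop_eq_nil_of_le (by omega)]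
    simp [pvRuns]
termination_by history.length - i
decreasing_by
  have := pvRunEnd_ge history history.length i (i + 1)
  omega

theorem pvKey (xs : List Int) : ∀ (v k tot : Int),
    (List.foldl pvStepA (v, k, tot) xs).2.2
      = tot + (if k < 6 ∧ 6 ≤ k + ((xs.takeWhile (· == v)).length : Int) then 1 else 0)
          + pvRuns (xs.dropWhile (· == v)) := by
  induction xs with
  | nil =>
    intro v k tot
    simp only [List.foldl_nil, List.takeWhile_nil, List.dropWhile_nil, List.length_nil,
      Nat.cast_zero, add_zero]
    rw [pvRuns, if_neg (by omega)]
    ring1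
  | cons c rest ih =>
    intro v k tot
    by_cases hv : v = c
    · subst hv
      rw [List.foldl_cons]
      have hstep : pvStepA (v, k, tot) v
          = (v, k + 1, if k + 1 = 6 then tot + 1 else tot) := by
        simp [pvStepA]
      rw [hstep, ih v (k + 1) _]
      rw [List.takeWhile_cons_of_pos (by simp), List.dropWhile_cons_of_pos (by simp)]
      simp only [List.length_cons]
      push_cast
      split_ifs <;> first | ring1 | (exfalso; omega)
    · rw [List.foldl_cons]
      have hstep : pvStepA (v, k, tot) c = (c, 1, tot) := by
        simp [pvStepA, hv]
      rw [hstep, ih c 1 tot]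
      rw [List.takeWhile_cons_of_neg (by simpa using Ne.symm hv),
        List.dropWhile_cons_of_neg (by simpa using Ne.symm hv)]
      rw [pvRuns]
      simp only [List.length_nil, Nat.cast_zero, add_zero]
      split_ifs <;> first | ring1 | (exfalso; omega)

theorem pv_a_eq_runs (history : List Int) : check_streaks history = pvRuns history := by
  cases history with
  | nil => simp [check_streaks, pvRuns]
  | cons c rest =>
    unfold check_streaks
    rw [List.foldl_cons]
    have hstep : pvStepA (0, 0, 0) c = (c, 1, 0) := by
      by_cases h : (0 : Int) = c
      · subst h; norm_num [pvStepA]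
      · simp [pvStepA, h]
    rw [hstep, pvKey rest c 1 0, pvRuns]
    split_ifs <;> first | ring1 | (exfalso; omega)

-- ===== VERDICT (by name: the statement is the Claim_ definition above) =====
theorem check_streaks_spec : Claim_equal_check_streaks := by
  intro history _
  unfold Spec_check_streaks check_streaks_alt
  rw [pv_a_eq_runs, pvOuter_eq]
  simp
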